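-- pv_equiv track=rewrite | github.com/piegeek/AlgorithmsPractice | Practice/algospot/dragon.py | get_nth_gen_str
-- ===== SOURCE A (Python) =====
-- def get_nth_gen_str(n):
-- 	if n == 0: return 'FX'
--
-- 	rules_x = 'X+YF'
-- 	rules_y = 'FX-Y'
--
-- 	n_minus_1_th_gen_str = get_nth_gen_str(n-1)
--
-- 	stack = []
--
-- 	for char in n_minus_1_th_gen_str:
-- 		if char == 'X':
-- 			stack.append(rules_x)
-- 		elif char == 'Y':
-- 			stack.append(rules_y)
-- 		else:
-- 			stack.append(char)
--
-- 	return ''.join(stack)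
-- ===== SOURCE B (Python) =====
-- def get_nth_gen_str(n):
--     # Iterative rewrite: repeatedly expand the L-system string n times.
--     s = 'FX'
--     for _ in range(n):
--         s = ''.join('X+YF' if c == 'X' else 'FX-Y' if c == 'Y' else c for c in s)
--     return s
-- ===== Notes on version B (the rewrite author's own statement) =====
-- stated objective: simpler
-- what changed: Replaces the top-down recursion (which rebuilds every earlier generation on the call stack) with a bottom-up loop that rewrites one string n times via a per-character map-and-join; Pre_ excludes only n<0, where A's recursion never terminates (RecursionError) while B returns 'FX'.
import Mathlib
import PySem

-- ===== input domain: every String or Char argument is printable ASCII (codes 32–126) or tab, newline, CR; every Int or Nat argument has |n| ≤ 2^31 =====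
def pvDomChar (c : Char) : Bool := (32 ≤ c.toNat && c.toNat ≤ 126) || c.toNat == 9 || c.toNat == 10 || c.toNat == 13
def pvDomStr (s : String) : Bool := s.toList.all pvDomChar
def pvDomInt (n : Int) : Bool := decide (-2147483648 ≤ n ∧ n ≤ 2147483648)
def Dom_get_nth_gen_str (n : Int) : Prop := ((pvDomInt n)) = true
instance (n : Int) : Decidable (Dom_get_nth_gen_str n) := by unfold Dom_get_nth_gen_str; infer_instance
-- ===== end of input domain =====

-- B replaces A's top-down recursion with a bottom-up loop rewriting the string n times (simpler, iterative).
-- Pre_ excludes only n < 0, where A raises RecursionError (infinite recursion).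


-- ===== PORT A =====
-- A's recursion is on n; for n ≥ 0 (= Pre_) it is structural on n.toNat, which is how it is written here.
-- stack.append is modelled by consing onto a reversed accumulator (reversed at the join): O(1) per append, as in Python
def getNthGenStrGoA : Nat → String
  | 0 => "FX"
  | Nat.succ k =>
    let n_minus_1_th_gen_str := getNthGenStrGoA k
    let stack := n_minus_1_th_gen_str.toList.foldl
      (fun st c =>
        (if c = 'X' then "X+YF"
         else if c = 'Y' then "FX-Y"
         else String.ofList [c]) :: st) []
    PySem.Str.join "" stack.reverse

def get_nth_gen_str (n : Int) : String := getNthGenStrGoA n.toNat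

-- ===== PORT B =====
-- one rewriting pass: ''.join of the per-character expansion
def dragonStep (s : String) : String :=
  PySem.Str.join "" (s.toList.map
    (fun c => if c = 'X' then "X+YF" else if c = 'Y' then "FX-Y" else String.ofList [c]))

def get_nth_gen_str_alt (n : Int) : String :=
  (List.range n.toNat).foldl (fun s _ => dragonStep s) "FX"

-- ===== PRECONDITION & SPEC =====
-- A raises RecursionError for n < 0 (the recursion n-1, n-2, … never reaches 0); those inputs are excluded.
def Pre_get_nth_gen_str (n : Int) : Prop := 0 ≤ n
instance (n : Int) : Decidable (Pre_get_nth_gen_str n) := by unfold Pre_get_nth_gen_str; infer_instance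
def pvWitness_get_nth_gen_str : Int := (3)

def Spec_get_nth_gen_str (n : Int) (out : String) : Prop := out = get_nth_gen_str_alt n
instance (n : Int) (out : String) : Decidable (Spec_get_nth_gen_str n out) := by unfold Spec_get_nth_gen_str; infer_instance

-- ===== CLAIM =====
def Claim_equal_get_nth_gen_str : Prop := ∀ (n : Int), Dom_get_nth_gen_str n → Pre_get_nth_gen_str n → Spec_get_nth_gen_str n (get_nth_gen_str n)

-- ===== LEMMAS AND PROOFS =====
lemma stack_foldl_eq_map (cs : List Char) (acc : List String) :
    cs.foldl
      (fun st c =>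
        (if c = 'X' then "X+YF"
         else if c = 'Y' then "FX-Y"
         else String.ofList [c]) :: st) acc
    = (cs.map (fun c => if c = 'X' then "X+YF" else if c = 'Y' then "FX-Y" else String.ofList [c])).reverse ++ acc := by
  induction cs generalizing acc with
  | nil => simp
  | cons c cs ih => simp [ih]

lemma goA_eq_fold (k : Nat) :
    getNthGenStrGoA k = (List.range k).foldl (fun s _ => dragonStep s) "FX" := by
  induction k with
  | zero => rfl
  | succ k ih =>
    rw [List.range_succ, List.foldl_append, ← ih]
    show PySem.Str.join "" _ = dragonStep (getNthGenStrGoA k)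
    rw [stack_foldl_eq_map]
    simp [dragonStep]

-- ===== VERDICT =====
theorem get_nth_gen_str_spec : Claim_equal_get_nth_gen_str := by
  intro n _ _
  unfold Spec_get_nth_gen_str get_nth_gen_str get_nth_gen_str_alt
  exact goA_eq_fold n.toNat
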